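-- pv_equiv track=rewrite | github.com/anitoanto/gitdirector | src/gitdirector/integrations/tmux.py | _resolve_pane_command
-- ===== SOURCE A (Python) =====
-- _SHELL_COMMANDS = frozenset(
--     {
--         "zsh",
--         "bash",
--         "fish",
--         "sh",
--         "dash",
--         "tcsh",
--         "csh",
--         "ksh",
--     }
-- )
--
-- _AGENT_PURPOSES = frozenset({"opencode", "claude", "copilot", "codex"})
--
-- def _resolve_pane_command(
--     pane_pid: int,
--     purpose: str,
--     fallback_command: str,
--     children_by_parent: dict[int, list[int]],
--     commands_by_pid: dict[int, str],
--     pgid_by_pid: dict[int, int],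
--     tpgid_by_pid: dict[int, int],
-- ) -> str:
--     descendants: list[tuple[int, int, str]] = []
--     stack: list[tuple[int, int]] = [(pane_pid, 0)]
--     seen: set[int] = set()
--     while stack:
--         pid, depth = stack.pop()
--         if pid in seen:
--             continue
--         seen.add(pid)
--         for child in children_by_parent.get(pid, []):
--             child_depth = depth + 1
--             stack.append((child, child_depth))
--             command = commands_by_pid.get(child, "")
--             if command:
--                 descendants.append((child_depth, child, command))
--
--     if not descendants:
--         return fallback_command
--
--     non_shell_descendants = [
--         descendant for descendant in descendants if descendant[2].lstrip("-") not in _SHELL_COMMANDS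
--     ]
--     if not non_shell_descendants:
--         return max(descendants, key=lambda descendant: (descendant[0], descendant[1]))[2]
--
--     if purpose in _AGENT_PURPOSES:
--         matching_agent_descendants = [
--             descendant
--             for descendant in non_shell_descendants
--             if descendant[2].lstrip("-") == purpose
--         ]
--         if matching_agent_descendants:
--             return min(
--                 matching_agent_descendants, key=lambda descendant: (descendant[0], descendant[1])
--             )[2]
--
--     pane_tpgid = tpgid_by_pid.get(pane_pid, 0)
--     if pane_tpgid > 0:
--         foreground_descendants = [
--             descendant
--             for descendant in non_shell_descendants
--             if pgid_by_pid.get(descendant[1]) == pane_tpgid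
--         ]
--         if foreground_descendants:
--             return min(
--                 foreground_descendants, key=lambda descendant: (descendant[0], descendant[1])
--             )[2]
--
--     return max(non_shell_descendants, key=lambda descendant: (descendant[0], descendant[1]))[2]
-- ===== SOURCE B (Python) =====
-- _SHELL_COMMANDS = frozenset(
--     {"zsh", "bash", "fish", "sh", "dash", "tcsh", "csh", "ksh"}
-- )
--
-- _AGENT_PURPOSES = frozenset({"opencode", "claude", "copilot", "codex"})
--
--
-- def _resolve_pane_command(
--     pane_pid,
--     purpose,
--     fallback_command,
--     children_by_parent,
--     commands_by_pid,
--     pgid_by_pid,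
--     tpgid_by_pid,
-- ):
--     descendants = []
--     seen = set()
--
--     def collect(pid, depth):
--         if pid in seen:
--             return
--         seen.add(pid)
--         children = children_by_parent.get(pid, [])
--         for child in children:
--             command = commands_by_pid.get(child, "")
--             if command:
--                 descendants.append((depth + 1, child, command))
--         # recurse into the last-listed child first: the LIFO visit order
--         for child in reversed(children):
--             collect(child, depth + 1)
--
--     collect(pane_pid, 0)
--
--     if not descendants:
--         return fallback_command
--
--     def earliest(entries, keep):
--         best = None
--         for entry in entries:
--             if keep(entry) and (
--                 best is None or (entry[0], entry[1]) < (best[0], best[1])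
--             ):
--                 best = entry
--         return best
--
--     def latest(entries):
--         best = None
--         for entry in entries:
--             if best is None or (entry[0], entry[1]) > (best[0], best[1]):
--                 best = entry
--         return best
--
--     non_shell = [d for d in descendants if d[2].lstrip("-") not in _SHELL_COMMANDS]
--     if not non_shell:
--         return latest(descendants)[2]
--
--     if purpose in _AGENT_PURPOSES:
--         agent = earliest(non_shell, lambda d: d[2].lstrip("-") == purpose)
--         if agent is not None:
--             return agent[2]
--
--     pane_tpgid = tpgid_by_pid.get(pane_pid, 0)
--     if pane_tpgid > 0:
--         foreground = earliest(
--             non_shell, lambda d: pgid_by_pid.get(d[1]) == pane_tpgid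
--         )
--         if foreground is not None:
--             return foreground[2]
--
--     return latest(non_shell)[2]
-- ===== Notes on version B (the rewrite author's own statement) =====
-- stated objective: alternative
-- what changed: The explicit-stack DFS over the process tree is replaced by a recursive collect helper (recursing into children in LIFO order, so the same descendants are gathered), and each filter-list + min/max-with-key selection pass is fused into a single best-so-far scan with a predicate.
import Mathlib
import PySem

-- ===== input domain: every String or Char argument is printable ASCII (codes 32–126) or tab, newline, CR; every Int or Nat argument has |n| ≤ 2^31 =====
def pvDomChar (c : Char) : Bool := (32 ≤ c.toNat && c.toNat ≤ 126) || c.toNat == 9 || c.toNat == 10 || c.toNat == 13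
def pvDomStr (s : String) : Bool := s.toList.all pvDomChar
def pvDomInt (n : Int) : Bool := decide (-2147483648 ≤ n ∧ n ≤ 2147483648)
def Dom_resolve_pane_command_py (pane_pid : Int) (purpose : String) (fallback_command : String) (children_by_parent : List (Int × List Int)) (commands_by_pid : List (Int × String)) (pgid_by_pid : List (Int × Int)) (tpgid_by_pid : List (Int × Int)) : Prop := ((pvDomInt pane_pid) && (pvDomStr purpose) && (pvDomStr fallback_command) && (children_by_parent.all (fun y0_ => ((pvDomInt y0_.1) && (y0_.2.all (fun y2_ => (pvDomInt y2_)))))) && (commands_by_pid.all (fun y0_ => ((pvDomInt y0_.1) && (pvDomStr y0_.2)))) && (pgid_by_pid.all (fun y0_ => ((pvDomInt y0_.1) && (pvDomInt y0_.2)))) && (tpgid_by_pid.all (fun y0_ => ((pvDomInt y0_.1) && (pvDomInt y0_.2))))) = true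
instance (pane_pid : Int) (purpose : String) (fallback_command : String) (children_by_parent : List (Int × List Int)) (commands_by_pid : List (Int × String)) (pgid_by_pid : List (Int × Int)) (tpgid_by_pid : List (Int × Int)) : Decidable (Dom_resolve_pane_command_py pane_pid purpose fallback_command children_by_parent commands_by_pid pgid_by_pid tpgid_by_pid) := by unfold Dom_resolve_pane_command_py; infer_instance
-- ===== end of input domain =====

-- B re-implements A's explicit-stack DFS as a recursive tree walk (same visit order) and fuses
-- each filter+min/max selection pass into one best-so-far scan; objective: alternative, same cost.

-- termination helpers, cited by both traversals' decreasing_by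
def pvPids (cbp : PySem.Dict Int (List Int)) : List Int :=
  cbp.items.flatMap (fun kv => kv.1 :: kv.2)

def pvUnseen (cbp : PySem.Dict Int (List Int)) (seen : PySem.Set Int) : Nat :=
  ((PySem.List.dedup (pvPids cbp)).filter (fun p => !(PySem.Set.contains seen p))).length

def pvChildBound (cbp : PySem.Dict Int (List Int)) : Nat :=
  (cbp.items.map (fun kv => kv.2.length)).sum

theorem pvContains_add (s : PySem.Set Int) (y x : Int) :
    PySem.Set.contains (PySem.Set.add s y) x = (PySem.Set.contains s x || decide (x = y)) := by
  unfold PySem.Set.add PySem.Set.contains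
  by_cases hxy : x = y
  · subst hxy
    split
    · next h => simp_all
    · simp [List.contains_append]
  · split
    · simp [hxy]
    · simp [List.contains_append, hxy]

theorem pvGetD_length_le (cbp : PySem.Dict Int (List Int)) (pid : Int) :
    (PySem.Dict.getD cbp pid ([] : List Int)).length ≤ pvChildBound cbp := by
  unfold PySem.Dict.getD PySem.Dict.get? pvChildBound
  cases hf : cbp.items.find? (fun p => p.1 == pid) with
  | none => simp [hf]
  | some kv =>
    simp only [hf, Option.map_some, Option.getD_some]
    exact List.le_sum_of_mem (List.mem_map_of_mem (List.mem_of_find?_eq_some hf))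

theorem pvUnseen_mono (cbp : PySem.Dict Int (List Int)) (s s' : PySem.Set Int)
    (h : ∀ x : Int, PySem.Set.contains s x = true → PySem.Set.contains s' x = true) :
    pvUnseen cbp s' ≤ pvUnseen cbp s := by
  unfold pvUnseen
  apply List.Sublist.length_le
  apply List.monotone_filter_right
  intro a ha
  simp only [Bool.not_eq_true'] at ha ⊢
  cases hc : PySem.Set.contains s a with
  | false => rfl
  | true => rw [h a hc] at ha; exact ha

theorem pvUnseen_add_le (cbp : PySem.Dict Int (List Int)) (seen : PySem.Set Int) (pid : Int) :
    pvUnseen cbp (PySem.Set.add seen pid) ≤ pvUnseen cbp seen := by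
  apply pvUnseen_mono
  intro x hx
  rw [pvContains_add, hx, Bool.true_or]

theorem pvUnseen_add_lt (cbp : PySem.Dict Int (List Int)) (seen : PySem.Set Int) (pid : Int)
    (hU : pid ∈ pvPids cbp) (hs : ¬ PySem.Set.contains seen pid = true) :
    pvUnseen cbp (PySem.Set.add seen pid) < pvUnseen cbp seen := by
  unfold pvUnseen
  have hsub : ((PySem.List.dedup (pvPids cbp)).filter (fun p => !(PySem.Set.contains (PySem.Set.add seen pid) p))).Sublist
      ((PySem.List.dedup (pvPids cbp)).filter (fun p => !(PySem.Set.contains seen p))) := by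
    apply List.monotone_filter_right
    intro a ha
    simp only [Bool.not_eq_true'] at ha ⊢
    rw [pvContains_add] at ha
    exact (Bool.or_eq_false_iff.mp ha).1
  rcases hsub.length_le.lt_or_eq with h | h
  · exact h
  · exfalso
    have heq := hsub.eq_of_length h
    have hmemold : pid ∈ (PySem.List.dedup (pvPids cbp)).filter (fun p => !(PySem.Set.contains seen p)) := by
      rw [List.mem_filter, PySem.List.mem_dedup]
      refine ⟨hU, ?_⟩
      rw [Bool.not_eq_true']
      exact Bool.eq_false_iff.mpr hs
    rw [← heq, List.mem_filter] at hmemold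
    rcases hmemold with ⟨_, hc⟩
    rw [pvContains_add] at hc
    simp at hc

theorem pvNotMem_getD_nil (cbp : PySem.Dict Int (List Int)) (pid : Int)
    (hU : pid ∉ pvPids cbp) : PySem.Dict.getD cbp pid ([] : List Int) = [] := by
  unfold PySem.Dict.getD PySem.Dict.get?
  have hfind : cbp.items.find? (fun p => p.1 == pid) = none := by
    rw [List.find?_eq_none]
    intro kv hkv
    simp only [beq_iff_eq]
    intro he
    exact hU (List.mem_flatMap.mpr ⟨kv, hkv, by simp [he]⟩)
  simp [hfind]

theorem pvFoldl_cons_eq (children : List Int) (d : Int) (rest : List (Int × Int)) :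
    children.foldl (fun s c => (c, d) :: s) rest = (children.map (fun c => (c, d))).reverse ++ rest := by
  induction children generalizing rest with
  | nil => simp
  | cons c t ih => simp [List.foldl_cons, ih]

-- the descendants.append step shared by the two Pythons' inner child loops
def pvDescStep (cmds : PySem.Dict Int String) (depth : Int)
    (ds : List (Int × Int × String)) (child : Int) : List (Int × Int × String) :=
  if PySem.Dict.getD cmds child "" ≠ "" then
    ds ++ [(depth + 1, child, PySem.Dict.getD cmds child "")]
  else ds

theorem pvPush_split (cmds : PySem.Dict Int String) (children : List Int) (depth : Int)
    (rest : List (Int × Int)) (desc : List (Int × Int × String)) :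
    children.foldl
      (fun (acc : List (Int × Int) × List (Int × Int × String)) child =>
        ((child, depth + 1) :: acc.1, pvDescStep cmds depth acc.2 child))
      (rest, desc)
    = (children.foldl (fun s c => (c, depth + 1) :: s) rest,
       children.foldl (pvDescStep cmds depth) desc) := by
  induction children generalizing rest desc with
  | nil => rfl
  | cons c t ih => simp only [List.foldl_cons]; rw [ih]

-- ===== PORT A =====
def pvLstripDash (s : String) : String :=
  String.ofList (s.toList.dropWhile (fun c => c == '-'))   -- exact port of s.lstrip("-")

def pvIsShell (s : String) : Bool :=
  ["zsh", "bash", "fish", "sh", "dash", "tcsh", "csh", "ksh"].contains s   -- s in _SHELL_COMMANDS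

def pvIsAgentPurpose (s : String) : Bool :=
  ["opencode", "claude", "copilot", "codex"].contains s   -- s in _AGENT_PURPOSES

-- A's while-loop over the explicit stack (stack top at the head; the push loop conses each
-- child in order, the desc list gains the children's entries in order)
def pvStackLoop (cbp : PySem.Dict Int (List Int)) (cmds : PySem.Dict Int String) :
    List (Int × Int) → PySem.Set Int → List (Int × Int × String) →
    PySem.Set Int × List (Int × Int × String)
  | [], seen, desc => (seen, desc)
  | (pid, depth) :: rest, seen, desc =>
    if PySem.Set.contains seen pid = true then
      pvStackLoop cbp cmds rest seen desc
    else
      let st := (PySem.Dict.getD cbp pid []).foldl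
        (fun (acc : List (Int × Int) × List (Int × Int × String)) child =>
          ((child, depth + 1) :: acc.1, pvDescStep cmds depth acc.2 child))
        (rest, desc)
      pvStackLoop cbp cmds st.1 (PySem.Set.add seen pid) st.2
termination_by stack seen _ => pvUnseen cbp seen * (pvChildBound cbp + 1) + stack.length
decreasing_by
  · simp
  · rw [pvPush_split]
    simp only [pvFoldl_cons_eq, List.length_append, List.length_reverse, List.length_map,
      List.length_cons]
    by_cases hU : pid ∈ pvPids cbp
    · have h1 := pvUnseen_add_lt cbp seen pid hU (by assumption)
      have h2 := pvGetD_length_le cbp pid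
      nlinarith [h1, h2]
    · rw [pvNotMem_getD_nil cbp pid hU]
      have h3 := pvUnseen_add_le cbp seen pid
      simp only [List.length_nil]
      nlinarith [h3]

def resolve_pane_command_py (pane_pid : Int) (purpose : String) (fallback_command : String)
    (children_by_parent : List (Int × List Int)) (commands_by_pid : List (Int × String))
    (pgid_by_pid : List (Int × Int)) (tpgid_by_pid : List (Int × Int)) : String :=
  let cbp := PySem.Dict.mk children_by_parent
  let cmds := PySem.Dict.mk commands_by_pid
  let pg := PySem.Dict.mk pgid_by_pid
  let tp := PySem.Dict.mk tpgid_by_pid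
  let descendants := (pvStackLoop cbp cmds [(pane_pid, 0)] PySem.Set.empty []).2
  if descendants = [] then fallback_command
  else
    let non_shell := descendants.filter (fun d => !(pvIsShell (pvLstripDash d.2.2)))
    if non_shell = [] then
      ((PySem.List.max2? descendants (fun d => d.1) (fun d => d.2.1)).getD (0, 0, "")).2.2
    else
      let matching := non_shell.filter (fun d => pvLstripDash d.2.2 == purpose)
      if pvIsAgentPurpose purpose = true ∧ matching ≠ [] then
        ((PySem.List.min2? matching (fun d => d.1) (fun d => d.2.1)).getD (0, 0, "")).2.2
      else
        let pane_tpgid := PySem.Dict.getD tp pane_pid 0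
        let fg := non_shell.filter (fun d => PySem.Dict.get? pg d.2.1 == some pane_tpgid)
        if pane_tpgid > 0 ∧ fg ≠ [] then
          ((PySem.List.min2? fg (fun d => d.1) (fun d => d.2.1)).getD (0, 0, "")).2.2
        else
          ((PySem.List.max2? non_shell (fun d => d.1) (fun d => d.2.1)).getD (0, 0, "")).2.2

-- ===== PORT B =====
-- B's recursive collect; the subtype records that `seen` only grows (needed for termination)
mutual
def pvCollect (cbp : PySem.Dict Int (List Int)) (cmds : PySem.Dict Int String)
    (pid depth : Int) (seen : PySem.Set Int) (desc : List (Int × Int × String)) :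
    {st : PySem.Set Int × List (Int × Int × String) //
      ∀ x : Int, PySem.Set.contains seen x = true → PySem.Set.contains st.1 x = true} :=
  if PySem.Set.contains seen pid = true then ⟨(seen, desc), fun _ hx => hx⟩
  else
    let children := PySem.Dict.getD cbp pid []
    match pvCollectRev cbp cmds children.reverse depth (PySem.Set.add seen pid)
        (children.foldl (pvDescStep cmds depth) desc) with
    | ⟨st1, h1⟩ => ⟨st1, fun x hx => h1 x (by rw [pvContains_add, hx, Bool.true_or])⟩
termination_by (pvUnseen cbp seen, 3)
decreasing_by
  · by_cases hU : pid ∈ pvPids cbp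
    · exact Prod.Lex.left _ _ (pvUnseen_add_lt cbp seen pid hU (by assumption))
    · rcases (pvUnseen_add_le cbp seen pid).lt_or_eq with h | h
      · exact Prod.Lex.left _ _ h
      · rw [h, pvNotMem_getD_nil cbp pid hU]
        apply Prod.Lex.right
        simp

def pvCollectRev (cbp : PySem.Dict Int (List Int)) (cmds : PySem.Dict Int String)
    (todo : List Int) (depth : Int) (seen : PySem.Set Int) (desc : List (Int × Int × String)) :
    {st : PySem.Set Int × List (Int × Int × String) //
      ∀ x : Int, PySem.Set.contains seen x = true → PySem.Set.contains st.1 x = true} :=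
  match todo with
  | [] => ⟨(seen, desc), fun _ hx => hx⟩
  | c :: rest =>
    match pvCollect cbp cmds c (depth + 1) seen desc with
    | ⟨st1, h1⟩ =>
      match pvCollectRev cbp cmds rest depth st1.1 st1.2 with
      | ⟨st2, h2⟩ => ⟨st2, fun x hx => h2 x (h1 x hx)⟩
termination_by (pvUnseen cbp seen, 2 * todo.length + 2)
decreasing_by
  · exact Prod.Lex.right _ (by simp; omega)
  · rcases (pvUnseen_mono cbp seen st1.1 h1).lt_or_eq with h | h
    · exact Prod.Lex.left _ _ h
    · rw [h]
      exact Prod.Lex.right _ (by simp)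
end

-- B's one-pass "first/last extremal entry" scans (Python's earliest/latest helpers)
def pvPickFirst (keep : Int × Int × String → Bool) (entries : List (Int × Int × String)) :
    Option (Int × Int × String) :=
  entries.foldl (fun best e =>
    if keep e then
      match best with
      | none => some e
      | some b => if e.1 < b.1 || (e.1 == b.1 && e.2.1 < b.2.1) then some e else some b
    else best) none

def pvPickLast (entries : List (Int × Int × String)) : Option (Int × Int × String) :=
  entries.foldl (fun best e =>
    match best with
    | none => some e
    | some b => if b.1 < e.1 || (b.1 == e.1 && b.2.1 < e.2.1) then some e else some b) none

def resolve_pane_command_py_alt (pane_pid : Int) (purpose : String) (fallback_command : String)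
    (children_by_parent : List (Int × List Int)) (commands_by_pid : List (Int × String))
    (pgid_by_pid : List (Int × Int)) (tpgid_by_pid : List (Int × Int)) : String :=
  let cbp := PySem.Dict.mk children_by_parent
  let cmds := PySem.Dict.mk commands_by_pid
  let pg := PySem.Dict.mk pgid_by_pid
  let tp := PySem.Dict.mk tpgid_by_pid
  let descendants := (pvCollect cbp cmds pane_pid 0 PySem.Set.empty []).val.2
  if descendants = [] then fallback_command
  else
    let non_shell := descendants.filter (fun d => !(pvIsShell (pvLstripDash d.2.2)))
    if non_shell = [] then ((pvPickLast descendants).getD (0, 0, "")).2.2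
    else
      match (if pvIsAgentPurpose purpose = true then
          pvPickFirst (fun d => pvLstripDash d.2.2 == purpose) non_shell else none) with
      | some a => a.2.2
      | none =>
        let pane_tpgid := PySem.Dict.getD tp pane_pid 0
        match (if pane_tpgid > 0 then
            pvPickFirst (fun d => PySem.Dict.get? pg d.2.1 == some pane_tpgid) non_shell
          else none) with
        | some f => f.2.2
        | none => ((pvPickLast non_shell).getD (0, 0, "")).2.2

-- ===== PRECONDITION & SPEC =====
def Spec_resolve_pane_command_py (pane_pid : Int) (purpose : String) (fallback_command : String) (children_by_parent : List (Int × List Int)) (commands_by_pid : List (Int × String)) (pgid_by_pid : List (Int × Int)) (tpgid_by_pid : List (Int × Int)) (out : String) : Prop := out = resolve_pane_command_py_alt pane_pid purpose fallback_command children_by_parent commands_by_pid pgid_by_pid tpgid_by_pid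
instance (pane_pid : Int) (purpose : String) (fallback_command : String) (children_by_parent : List (Int × List Int)) (commands_by_pid : List (Int × String)) (pgid_by_pid : List (Int × Int)) (tpgid_by_pid : List (Int × Int)) (out : String) : Decidable (Spec_resolve_pane_command_py pane_pid purpose fallback_command children_by_parent commands_by_pid pgid_by_pid tpgid_by_pid out) := by unfold Spec_resolve_pane_command_py; infer_instance

-- ===== CLAIM (what is proved, stated in full; the proofs are below) =====
def Claim_equal_resolve_pane_command_py : Prop := ∀ (pane_pid : Int) (purpose : String) (fallback_command : String) (children_by_parent : List (Int × List Int)) (commands_by_pid : List (Int × String)) (pgid_by_pid : List (Int × Int)) (tpgid_by_pid : List (Int × Int)), Dom_resolve_pane_command_py pane_pid purpose fallback_command children_by_parent commands_by_pid pgid_by_pid tpgid_by_pid → Spec_resolve_pane_command_py pane_pid purpose fallback_command children_by_parent commands_by_pid pgid_by_pid tpgid_by_pid (resolve_pane_command_py pane_pid purpose fallback_command children_by_parent commands_by_pid pgid_by_pid tpgid_by_pid)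

-- ===== LEMMAS AND PROOFS =====
theorem pvStackLoop_nil (cbp : PySem.Dict Int (List Int)) (cmds : PySem.Dict Int String)
    (seen : PySem.Set Int) (desc : List (Int × Int × String)) :
    pvStackLoop cbp cmds [] seen desc = (seen, desc) := by
  rw [pvStackLoop]

theorem pvStackLoop_cons_seen (cbp : PySem.Dict Int (List Int)) (cmds : PySem.Dict Int String)
    (pid depth : Int) (rest : List (Int × Int)) (seen : PySem.Set Int)
    (desc : List (Int × Int × String)) (h : PySem.Set.contains seen pid = true) :
    pvStackLoop cbp cmds ((pid, depth) :: rest) seen desc = pvStackLoop cbp cmds rest seen desc := by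
  rw [pvStackLoop, if_pos h]

theorem pvStackLoop_cons_unseen (cbp : PySem.Dict Int (List Int)) (cmds : PySem.Dict Int String)
    (pid depth : Int) (rest : List (Int × Int)) (seen : PySem.Set Int)
    (desc : List (Int × Int × String)) (h : ¬ PySem.Set.contains seen pid = true) :
    pvStackLoop cbp cmds ((pid, depth) :: rest) seen desc =
      pvStackLoop cbp cmds
        (((PySem.Dict.getD cbp pid []).map (fun c => (c, depth + 1))).reverse ++ rest)
        (PySem.Set.add seen pid)
        ((PySem.Dict.getD cbp pid []).foldl (pvDescStep cmds depth) desc) := by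
  rw [pvStackLoop, if_neg h]
  simp only [pvPush_split, pvFoldl_cons_eq]

theorem pvStackLoop_append (cbp : PySem.Dict Int (List Int)) (cmds : PySem.Dict Int String)
    (l1 : List (Int × Int)) (seen : PySem.Set Int) (desc : List (Int × Int × String)) :
    ∀ l2, pvStackLoop cbp cmds (l1 ++ l2) seen desc =
      pvStackLoop cbp cmds l2 (pvStackLoop cbp cmds l1 seen desc).1
        (pvStackLoop cbp cmds l1 seen desc).2 := by
  induction l1, seen, desc using pvStackLoop.induct cbp cmds with
  | case1 seen desc => intro l2; simp [pvStackLoop_nil]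
  | case2 pid depth rest seen desc h ih =>
    intro l2
    rw [List.cons_append, pvStackLoop_cons_seen _ _ _ _ _ _ _ h,
      pvStackLoop_cons_seen _ _ _ _ _ _ _ h]
    exact ih l2
  | case3 pid depth rest seen desc h st ih =>
    intro l2
    have hst : st = (PySem.Dict.getD cbp pid []).foldl
        (fun (acc : List (Int × Int) × List (Int × Int × String)) child =>
          ((child, depth + 1) :: acc.1, pvDescStep cmds depth acc.2 child))
        (rest, desc) := rfl
    rw [hst, pvPush_split] at ih
    rw [List.cons_append, pvStackLoop_cons_unseen _ _ _ _ _ _ _ h,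
      pvStackLoop_cons_unseen _ _ _ _ _ _ _ h, ← List.append_assoc]
    have := ih l2
    rw [pvFoldl_cons_eq] at this
    exact this

theorem pvCollect_val_seen (cbp : PySem.Dict Int (List Int)) (cmds : PySem.Dict Int String)
    (pid depth : Int) (seen : PySem.Set Int) (desc : List (Int × Int × String))
    (h : PySem.Set.contains seen pid = true) :
    (pvCollect cbp cmds pid depth seen desc).val = (seen, desc) := by
  conv_lhs => rw [pvCollect]
  rw [if_pos h]

theorem pvCollect_val_unseen (cbp : PySem.Dict Int (List Int)) (cmds : PySem.Dict Int String)
    (pid depth : Int) (seen : PySem.Set Int) (desc : List (Int × Int × String))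
    (h : ¬ PySem.Set.contains seen pid = true) :
    (pvCollect cbp cmds pid depth seen desc).val =
      (pvCollectRev cbp cmds (PySem.Dict.getD cbp pid []).reverse depth (PySem.Set.add seen pid)
        ((PySem.Dict.getD cbp pid []).foldl (pvDescStep cmds depth) desc)).val := by
  conv_lhs => rw [pvCollect]
  rw [if_neg h]

theorem pvCollectRev_val_nil (cbp : PySem.Dict Int (List Int)) (cmds : PySem.Dict Int String)
    (depth : Int) (seen : PySem.Set Int) (desc : List (Int × Int × String)) :
    (pvCollectRev cbp cmds [] depth seen desc).val = (seen, desc) := by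
  conv_lhs => rw [pvCollectRev]

theorem pvCollectRev_val_cons (cbp : PySem.Dict Int (List Int)) (cmds : PySem.Dict Int String)
    (c : Int) (rest : List Int) (depth : Int) (seen : PySem.Set Int)
    (desc : List (Int × Int × String)) :
    (pvCollectRev cbp cmds (c :: rest) depth seen desc).val =
      (pvCollectRev cbp cmds rest depth (pvCollect cbp cmds c (depth + 1) seen desc).val.1
        (pvCollect cbp cmds c (depth + 1) seen desc).val.2).val := by
  conv_lhs => rw [pvCollectRev]

theorem pvCollect_stack_both (cbp : PySem.Dict Int (List Int)) (cmds : PySem.Dict Int String) :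
    (∀ (pid depth : Int) (seen : PySem.Set Int) (desc : List (Int × Int × String)),
      (pvCollect cbp cmds pid depth seen desc).val = pvStackLoop cbp cmds [(pid, depth)] seen desc) ∧
    (∀ (todo : List Int) (depth : Int) (seen : PySem.Set Int) (desc : List (Int × Int × String)),
      (pvCollectRev cbp cmds todo depth seen desc).val =
        pvStackLoop cbp cmds (todo.map (fun c => (c, depth + 1))) seen desc) := by
  have C1 : ∀ (pid depth : Int) (seen : PySem.Set Int) (desc : List (Int × Int × String)),
      PySem.Set.contains seen pid = true →
      (pvCollect cbp cmds pid depth seen desc).val = pvStackLoop cbp cmds [(pid, depth)] seen desc := by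
    intro pid depth seen desc h
    rw [pvCollect_val_seen _ _ _ _ _ _ h, pvStackLoop_cons_seen _ _ _ _ _ _ _ h, pvStackLoop_nil]
  have C2 : ∀ (pid depth : Int) (seen : PySem.Set Int) (desc : List (Int × Int × String)),
      ¬ PySem.Set.contains seen pid = true →
      ∀ (st1 : PySem.Set Int × List (Int × Int × String))
        (h1 : ∀ x : Int, PySem.Set.contains (PySem.Set.add seen pid) x = true →
          PySem.Set.contains st1.1 x = true),
        pvCollectRev cbp cmds (PySem.Dict.getD cbp pid []).reverse depth (PySem.Set.add seen pid)
            ((PySem.Dict.getD cbp pid []).foldl (pvDescStep cmds depth) desc) = ⟨st1, h1⟩ →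
        (pvCollectRev cbp cmds (PySem.Dict.getD cbp pid []).reverse depth (PySem.Set.add seen pid)
            ((PySem.Dict.getD cbp pid []).foldl (pvDescStep cmds depth) desc)).val =
          pvStackLoop cbp cmds ((PySem.Dict.getD cbp pid []).reverse.map (fun c => (c, depth + 1)))
            (PySem.Set.add seen pid)
            ((PySem.Dict.getD cbp pid []).foldl (pvDescStep cmds depth) desc) →
        (pvCollect cbp cmds pid depth seen desc).val = pvStackLoop cbp cmds [(pid, depth)] seen desc := by
    intro pid depth seen desc h st1 h1 heq ihM2
    rw [pvCollect_val_unseen _ _ _ _ _ _ h, ihM2, pvStackLoop_cons_unseen _ _ _ _ _ _ _ h]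
    simp [List.map_reverse]
  have C3 : ∀ (depth : Int) (seen : PySem.Set Int) (desc : List (Int × Int × String)),
      (pvCollectRev cbp cmds [] depth seen desc).val =
        pvStackLoop cbp cmds (List.map (fun c => (c, depth + 1)) []) seen desc := by
    intro depth seen desc
    rw [pvCollectRev_val_nil]
    simp [pvStackLoop_nil]
  have C4 : ∀ (depth : Int) (seen : PySem.Set Int) (desc : List (Int × Int × String)) (c : Int)
      (rest : List Int) (st1 : PySem.Set Int × List (Int × Int × String))
      (h1 : ∀ x : Int, PySem.Set.contains seen x = true → PySem.Set.contains st1.1 x = true),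
      pvCollect cbp cmds c (depth + 1) seen desc = ⟨st1, h1⟩ →
      ∀ (st2 : PySem.Set Int × List (Int × Int × String))
        (h2 : ∀ x : Int, PySem.Set.contains st1.1 x = true → PySem.Set.contains st2.1 x = true),
        pvCollectRev cbp cmds rest depth st1.1 st1.2 = ⟨st2, h2⟩ →
        (pvCollect cbp cmds c (depth + 1) seen desc).val =
          pvStackLoop cbp cmds [(c, depth + 1)] seen desc →
        (pvCollectRev cbp cmds rest depth st1.1 st1.2).val =
          pvStackLoop cbp cmds (rest.map (fun c => (c, depth + 1))) st1.1 st1.2 →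
        (pvCollectRev cbp cmds (c :: rest) depth seen desc).val =
          pvStackLoop cbp cmds ((c :: rest).map (fun c => (c, depth + 1))) seen desc := by
    intro depth seen desc c rest st1 h1 heq1 st2 h2 heq2 ih1 ih2
    have hstep := pvStackLoop_append cbp cmds [(c, depth + 1)] seen desc
      (rest.map (fun c => (c, depth + 1)))
    simp only [List.singleton_append] at hstep
    rw [pvCollectRev_val_cons, heq1]
    dsimp only
    rw [ih2, List.map_cons, hstep, ← ih1, heq1]
  exact ⟨fun pid depth seen desc =>
      pvCollect.induct cbp cmds
        (fun pid depth seen desc =>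
        (pvCollect cbp cmds pid depth seen desc).val = pvStackLoop cbp cmds [(pid, depth)] seen desc)
        (fun todo depth seen desc =>
        (pvCollectRev cbp cmds todo depth seen desc).val =
          pvStackLoop cbp cmds (todo.map (fun c => (c, depth + 1))) seen desc)
        C1 C2 C3 C4 pid depth seen desc,
    fun todo depth seen desc =>
      pvCollectRev.induct cbp cmds
        (fun pid depth seen desc =>
        (pvCollect cbp cmds pid depth seen desc).val = pvStackLoop cbp cmds [(pid, depth)] seen desc)
        (fun todo depth seen desc =>
        (pvCollectRev cbp cmds todo depth seen desc).val =
          pvStackLoop cbp cmds (todo.map (fun c => (c, depth + 1))) seen desc)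
        C1 C2 C3 C4 todo depth seen desc⟩

theorem pvCollect_eq_stack (cbp : PySem.Dict Int (List Int)) (cmds : PySem.Dict Int String)
    (pid depth : Int) (seen : PySem.Set Int) (desc : List (Int × Int × String)) :
    (pvCollect cbp cmds pid depth seen desc).val = pvStackLoop cbp cmds [(pid, depth)] seen desc :=
  (pvCollect_stack_both cbp cmds).1 pid depth seen desc

theorem pvPickLast_eq (xs : List (Int × Int × String)) :
    pvPickLast xs = PySem.List.max2? xs (fun d => d.1) (fun d => d.2.1) := by
  unfold pvPickLast PySem.List.max2?
  congr 1
  funext best e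
  cases best with
  | none => rfl
  | some b =>
    have hc : (b.1 < e.1 || (b.1 == e.1 && b.2.1 < e.2.1)) =
        (decide (b.1 < e.1) || (!decide (e.1 < b.1) && decide (b.2.1 < e.2.1))) := by
      rcases lt_trichotomy b.1 e.1 with h | h | h
      · simp [h]
      · simp [h, lt_irrefl]
      · simp [h, not_lt_of_gt h, ne_of_gt h, Int.ne_of_gt h]
    simp only [hc]

theorem pvPickFirst_eq (keep : Int × Int × String → Bool) (xs : List (Int × Int × String)) :
    pvPickFirst keep xs = PySem.List.min2? (xs.filter keep) (fun d => d.1) (fun d => d.2.1) := by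
  unfold pvPickFirst PySem.List.min2?
  rw [← PySem.List.foldl_if_eq_foldl_filter keep]
  congr 1
  funext best e
  cases best with
  | none => rfl
  | some b =>
    by_cases hk : keep e
    · simp only [hk, if_true]
      have hc : (e.1 < b.1 || (e.1 == b.1 && e.2.1 < b.2.1)) =
          (decide (e.1 < b.1) || (!decide (b.1 < e.1) && decide (e.2.1 < b.2.1))) := by
        rcases lt_trichotomy e.1 b.1 with h | h | h
        · simp [h]
        · simp [h, lt_irrefl]
        · simp [h, not_lt_of_gt h, ne_of_gt h, Int.ne_of_gt h]
      simp only [hc]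
    · simp [hk]

theorem pvFoldlOption_isSome {β : Type} (g : Option β → β → Option β)
    (hg : ∀ (b : β) (x : β), (g (some b) x).isSome = true) :
    ∀ (t : List β) (b : β), (t.foldl g (some b)).isSome = true := by
  intro t
  induction t with
  | nil => intro b; rfl
  | cons x rest ih =>
    intro b
    rw [List.foldl_cons]
    rcases Option.isSome_iff_exists.mp (hg b x) with ⟨b', hb⟩
    rw [hb]
    exact ih b'

theorem pvMin2_eq_none_iff (xs : List (Int × Int × String)) :
    PySem.List.min2? xs (fun d => d.1) (fun d => d.2.1) = none ↔ xs = [] := by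
  cases xs with
  | nil => simp [PySem.List.min2?]
  | cons x t =>
    simp only [PySem.List.min2?, List.foldl_cons]
    constructor
    · intro h
      apply absurd h
      apply Option.isSome_iff_ne_none.mp
      apply pvFoldlOption_isSome
      intro b y
      split
      · rfl
      · split <;> rfl
    · intro h; exact absurd h (by simp)

-- ===== VERDICT =====
theorem resolve_pane_command_py_spec : Claim_equal_resolve_pane_command_py := by
  intro pane_pid purpose fallback_command children_by_parent commands_by_pid pgid_by_pid tpgid_by_pid _
  unfold Spec_resolve_pane_command_py
  simp only [resolve_pane_command_py, resolve_pane_command_py_alt, pvCollect_eq_stack,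
    pvPickLast_eq, pvPickFirst_eq]
  set D := (pvStackLoop (PySem.Dict.mk children_by_parent) (PySem.Dict.mk commands_by_pid)
    [(pane_pid, 0)] PySem.Set.empty []).2 with hD
  by_cases hd : D = []
  · simp [hd]
  · simp only [if_neg hd]
    set NS := D.filter (fun d => !(pvIsShell (pvLstripDash d.2.2))) with hNS
    by_cases hns : NS = []
    · simp [hns]
    · simp only [if_neg hns]
      by_cases hag : pvIsAgentPurpose purpose = true
      · simp only [hag, if_true]
        cases hm : PySem.List.min2? (NS.filter (fun d => pvLstripDash d.2.2 == purpose))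
            (fun d => d.1) (fun d => d.2.1) with
        | some m =>
          have hne : NS.filter (fun d => pvLstripDash d.2.2 == purpose) ≠ [] := by
            intro h0
            rw [h0] at hm
            simp [PySem.List.min2?] at hm
          simp [hm, hne, hag]
        | none =>
          have h0 := (pvMin2_eq_none_iff _).mp hm
          simp only [hm, h0]
          simp only [ne_eq, not_true_eq_false, and_false, if_false]
          by_cases htp : PySem.Dict.getD (PySem.Dict.mk tpgid_by_pid) pane_pid 0 > 0
          · cases hf : PySem.List.min2?
                (NS.filter (fun d => PySem.Dict.get? (PySem.Dict.mk pgid_by_pid) d.2.1 ==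
                  some (PySem.Dict.getD (PySem.Dict.mk tpgid_by_pid) pane_pid 0)))
                (fun d => d.1) (fun d => d.2.1) with
            | some f =>
              have hne : NS.filter (fun d => PySem.Dict.get? (PySem.Dict.mk pgid_by_pid) d.2.1 ==
                  some (PySem.Dict.getD (PySem.Dict.mk tpgid_by_pid) pane_pid 0)) ≠ [] := by
                intro h1
                rw [h1] at hf
                simp [PySem.List.min2?] at hf
              simp [htp, hf, hne]
            | none =>
              have h1 := (pvMin2_eq_none_iff _).mp hf
              simp [htp, hf, h1]
          · simp only [htp, if_false]
            simp [htp]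
      · simp only [hag, if_false]
        simp only [Bool.false_eq_true, false_and, if_false]
        by_cases htp : PySem.Dict.getD (PySem.Dict.mk tpgid_by_pid) pane_pid 0 > 0
        · cases hf : PySem.List.min2?
              (NS.filter (fun d => PySem.Dict.get? (PySem.Dict.mk pgid_by_pid) d.2.1 ==
                some (PySem.Dict.getD (PySem.Dict.mk tpgid_by_pid) pane_pid 0)))
              (fun d => d.1) (fun d => d.2.1) with
          | some f =>
            have hne : NS.filter (fun d => PySem.Dict.get? (PySem.Dict.mk pgid_by_pid) d.2.1 ==
                some (PySem.Dict.getD (PySem.Dict.mk tpgid_by_pid) pane_pid 0)) ≠ [] := by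
              intro h1
              rw [h1] at hf
              simp [PySem.List.min2?] at hf
            simp [htp, hf, hne]
          | none =>
            have h1 := (pvMin2_eq_none_iff _).mp hf
            simp [htp, hf, h1]
        · simp only [htp, if_false]
          simp [htp]
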